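-- pv_equiv track=rewrite | github.com/yang-su2000/CP-Practice | archived/2022-09/G22a.py | foo
-- ===== SOURCE A (Python) =====
-- def foo(n, a, b):
--     l1 = []
--     l2 = []
--     for i in range(n):
--         if a[i] == 0:
--             l1.append(b[i])
--         else:
--             l2.append(b[i])
--     l1.sort()
--     l2.sort()
--     ans = 0
--     while l1 and l2:
--         ans += 2 * (l1.pop() + l2.pop())
--     if l1:
--         ans += sum(l1)
--     elif l2:
--         ans += sum(l2)
--     else:
--         ans -= min(b)
--     return ans
-- ===== SOURCE B (Python) =====
-- def foo(n, a, b):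
--     m = max(n, 0)
--     aa = a[:m]
--     bb = b[:m]
--     cz = aa.count(0)
--     if cz == 0:
--         zeros, ones = [], bb
--     elif cz == m:
--         zeros, ones = bb, []
--     else:
--         zeros = []
--         ones = []
--         for x, y in zip(aa, bb):
--             if x == 0:
--                 zeros.append(y)
--             else:
--                 ones.append(y)
--     if len(zeros) == len(ones):
--         # every element is paired; min(b) is subtracted as in the problem's scoring
--         return 2 * (sum(zeros) + sum(ones)) - min(b)
--     short, long = (zeros, ones) if len(zeros) < len(ones) else (ones, zeros)
--     k = len(short)
--     if k == 0:
--         # nothing is paired: no sort needed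
--         return sum(long)
--     srt = sorted(long)
--     # pairing doubles all of the short group and the k largest of the long group
--     return 2 * sum(short) + sum(long) + sum(srt[len(srt) - k:])
-- ===== Notes on version B (the rewrite author's own statement) =====
-- stated objective: faster
-- what changed: Replaces sort-both-groups-then-pop-pairing by a closed-form sum: partition once over zip (with C-speed count/slice fast paths when one group is empty), sort only the larger group, and add twice the short group's sum plus the long group's sum plus its top-k tail slice, so one sort and the whole Python-level while/pop loop disappear.
import Mathlib
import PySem

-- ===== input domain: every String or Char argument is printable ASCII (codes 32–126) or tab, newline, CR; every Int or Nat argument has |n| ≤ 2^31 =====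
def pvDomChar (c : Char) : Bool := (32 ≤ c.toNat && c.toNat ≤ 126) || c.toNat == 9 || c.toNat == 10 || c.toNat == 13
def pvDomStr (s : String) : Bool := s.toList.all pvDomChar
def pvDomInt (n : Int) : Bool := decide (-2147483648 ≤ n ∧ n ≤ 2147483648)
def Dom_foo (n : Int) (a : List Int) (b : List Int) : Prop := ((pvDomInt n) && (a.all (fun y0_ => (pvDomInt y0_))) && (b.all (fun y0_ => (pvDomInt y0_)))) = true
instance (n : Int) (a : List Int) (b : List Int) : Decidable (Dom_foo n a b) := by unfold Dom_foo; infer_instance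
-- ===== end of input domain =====

-- B replaces the sort-both-groups-and-pop-pairing loop by a closed-form sum over a zip-based
-- partition with count-based fast paths for homogeneous groups, sorting only the larger group.


-- ===== PORT A =====
-- 'while l1 and l2: ans += 2 * (l1.pop() + l2.pop())' — returns (ans, l1, l2) after the loop
def fooWhile (l1 l2 : List Int) (ans : Int) : Int × List Int × List Int :=
  if h : l1 ≠ [] ∧ l2 ≠ [] then
    fooWhile l1.dropLast l2.dropLast (ans + 2 * (l1.getLast h.1 + l2.getLast h.2))
  else (ans, l1, l2)
termination_by l1.length
decreasing_by
  have := List.length_pos_of_ne_nil h.1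
  simp [List.length_dropLast]; omega

def foo (n : Int) (a : List Int) (b : List Int) : Int :=
  -- a[i]/b[i]: indices 0 ≤ i < n are in range under Pre_foo, so pyGetD is exact here
  let st := (PySem.List.pyRange 0 n 1).foldl
    (fun (st : List Int × List Int) i =>
      if PySem.List.pyGetD a i 0 = 0 then (st.1 ++ [PySem.List.pyGetD b i 0], st.2)
      else (st.1, st.2 ++ [PySem.List.pyGetD b i 0])) ([], [])
  let l1 := PySem.List.sorted st.1 (fun x => x) false
  let l2 := PySem.List.sorted st.2 (fun x => x) false
  let r := fooWhile l1 l2 0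
  if r.2.1 ≠ [] then r.1 + r.2.1.sum
  else if r.2.2 ≠ [] then r.1 + r.2.2.sum
  else r.1 - (PySem.List.min? b (fun x => x)).getD 0   -- min(b); b ≠ [] under Pre_foo

-- ===== PORT B =====
def foo_alt (n : Int) (a : List Int) (b : List Int) : Int :=
  let m : Int := max n 0
  let aa := PySem.List.slice a none (some m)
  let bb := PySem.List.slice b none (some m)
  let cz := PySem.List.count aa 0
  let zo : List Int × List Int :=
    if cz = 0 then ([], bb)
    else if cz = m then (bb, [])
    else (aa.zip bb).foldl
      (fun (st : List Int × List Int) e =>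
        if e.1 = 0 then (st.1 ++ [e.2], st.2) else (st.1, st.2 ++ [e.2])) ([], [])
  let zeros := zo.1
  let ones := zo.2
  if zeros.length = ones.length then
    2 * (zeros.sum + ones.sum) - (PySem.List.min? b (fun x => x)).getD 0
  else
    let sl := if zeros.length < ones.length then (zeros, ones) else (ones, zeros)
    let k := sl.1.length
    if k = 0 then sl.2.sum   -- nothing is paired: no sort needed
    else
      let srt := PySem.List.sorted sl.2 (fun x => x) false
      2 * sl.1.sum + sl.2.sum +
        (PySem.List.slice srt (some ((srt.length : Int) - (k : Int))) none).sum

-- ===== PRECONDITION & SPEC =====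
-- Pre_foo is exactly where A returns: n ≤ len(a) and n ≤ len(b) avoid IndexError in the
-- partition loop, and b ≠ [] avoids ValueError from min(b) (with b = [], n ≤ 0 is forced
-- and the groups are empty, so A always reaches min(b)). Nothing A returns on is excluded.
def Pre_foo (n : Int) (a : List Int) (b : List Int) : Prop :=
  n ≤ a.length ∧ n ≤ b.length ∧ b ≠ []
instance (n : Int) (a : List Int) (b : List Int) : Decidable (Pre_foo n a b) := by
  unfold Pre_foo; infer_instance
def pvWitness_foo : Int × List Int × List Int := (2, [0, 1], [3, 4])

def Spec_foo (n : Int) (a : List Int) (b : List Int) (out : Int) : Prop := out = foo_alt n a b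
instance (n : Int) (a : List Int) (b : List Int) (out : Int) : Decidable (Spec_foo n a b out) := by unfold Spec_foo; infer_instance

-- ===== CLAIM (what is proved, stated in full; the proofs are below) =====
def Claim_equal_foo : Prop := ∀ (n : Int) (a : List Int) (b : List Int), Dom_foo n a b → Pre_foo n a b → Spec_foo n a b (foo n a b)

-- ===== LEMMAS AND PROOFS =====

-- the partition loop of A builds the two index-comprehension lists
lemma partition_eq (a b : List Int) (L : List Int) (acc1 acc2 : List Int) :
    L.foldl (fun (st : List Int × List Int) i =>
      if PySem.List.pyGetD a i 0 = 0 then (st.1 ++ [PySem.List.pyGetD b i 0], st.2)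
      else (st.1, st.2 ++ [PySem.List.pyGetD b i 0])) (acc1, acc2)
    = (acc1 ++ (L.filter (fun i => PySem.List.pyGetD a i 0 == 0)).map (fun i => PySem.List.pyGetD b i 0),
       acc2 ++ (L.filter (fun i => !(PySem.List.pyGetD a i 0 == 0))).map (fun i => PySem.List.pyGetD b i 0)) := by
  induction L generalizing acc1 acc2 with
  | nil => simp
  | cons x t ih => by_cases hx : PySem.List.pyGetD a x 0 = 0 <;> simp [hx, ih]

-- B's zip loop builds the two zip-filter lists
lemma zip_partition_eq (L : List (Int × Int)) (acc1 acc2 : List Int) :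
    L.foldl (fun (st : List Int × List Int) e =>
      if e.1 = 0 then (st.1 ++ [e.2], st.2) else (st.1, st.2 ++ [e.2])) (acc1, acc2)
    = (acc1 ++ (L.filter (fun e => e.1 == 0)).map (fun e => e.2),
       acc2 ++ (L.filter (fun e => !(e.1 == 0))).map (fun e => e.2)) := by
  induction L generalizing acc1 acc2 with
  | nil => simp
  | cons x t ih => by_cases hx : x.1 = 0 <;> simp [hx, ih]

-- index comprehensions over range(M) are zip comprehensions over the clipped lists
lemma bridge (a b : List Int) (M : Nat) (ha : M ≤ a.length) (hb : M ≤ b.length) :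
    ((PySem.List.pyRange 0 (M : Int) 1).filter (fun i => PySem.List.pyGetD a i 0 == 0)).map
        (fun i => PySem.List.pyGetD b i 0)
      = (((a.take M).zip (b.take M)).filter (fun e => e.1 == 0)).map (fun e => e.2)
  ∧ ((PySem.List.pyRange 0 (M : Int) 1).filter (fun i => !(PySem.List.pyGetD a i 0 == 0))).map
        (fun i => PySem.List.pyGetD b i 0)
      = (((a.take M).zip (b.take M)).filter (fun e => !(e.1 == 0))).map (fun e => e.2) := by
  induction M with
  | zero => simp [PySem.List.pyRange_one_eq_nil]
  | succ M ih =>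
    obtain ⟨ih1, ih2⟩ := ih (by omega) (by omega)
    have hMa : M < a.length := by omega
    have hMb : M < b.length := by omega
    have hr : PySem.List.pyRange 0 ((M + 1 : Nat) : Int) 1
        = PySem.List.pyRange 0 (M : Int) 1 ++ [(M : Int)] := by
      push_cast
      exact PySem.List.pyRange_one_succ_right (by omega)
    have hta : a.take (M + 1) = a.take M ++ [a[M]] := List.take_succ_eq_append_getElem hMa
    have htb : b.take (M + 1) = b.take M ++ [b[M]] := List.take_succ_eq_append_getElem hMb
    have hz : (a.take (M + 1)).zip (b.take (M + 1))
        = (a.take M).zip (b.take M) ++ [(a[M], b[M])] := by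
      rw [hta, htb, List.zip_append (by simp [hMa.le, hMb.le])]
      simp
    have hga : PySem.List.pyGetD a (M : Int) 0 = a[M] := by
      simp [PySem.List.pyGetD_natCast, List.getElem?_eq_getElem hMa]
    have hgb : PySem.List.pyGetD b (M : Int) 0 = b[M] := by
      simp [PySem.List.pyGetD_natCast, List.getElem?_eq_getElem hMb]
    constructor
    · rw [hr, hz, List.filter_append, List.filter_append, List.map_append, List.map_append,
        ih1]
      by_cases hc : a[M] = 0 <;> simp [hga, hgb, hc]
    · rw [hr, hz, List.filter_append, List.filter_append, List.map_append, List.map_append,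
        ih2]
      by_cases hc : a[M] = 0 <;> simp [hga, hgb, hc]

lemma fooWhile_step (t1 t2 : List Int) (x y : Int) (ans : Int) :
    fooWhile (t1 ++ [x]) (t2 ++ [y]) ans = fooWhile t1 t2 (ans + 2 * (x + y)) := by
  rw [fooWhile]
  simp

lemma fooWhile_le (l1 l2 : List Int) (ans : Int) (h : l1.length ≤ l2.length) :
    fooWhile l1 l2 ans =
      (ans + 2 * (l1.sum + (l2.drop (l2.length - l1.length)).sum), [],
       l2.take (l2.length - l1.length)) := by
  induction l1 using List.reverseRecOn generalizing l2 ans with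
  | nil =>
    rw [fooWhile]; simp
  | append_singleton t x ih =>
    rcases List.eq_nil_or_concat l2 with rfl | ⟨t2, y, rfl⟩
    · simp at h
    · simp only [List.concat_eq_append] at h ⊢
      have hle : t.length ≤ t2.length := by simp at h; omega
      have hd : (t2 ++ [y]).length - (t ++ [x]).length = t2.length - t.length := by
        simp
      rw [fooWhile_step, ih _ _ hle, hd]
      simp only [Prod.mk.injEq]
      refine ⟨?_, trivial, ?_⟩
      · rw [List.drop_append_of_le_length (by omega)]
        simp; ring
      · rw [List.take_append_of_le_length (by omega)]

lemma fooWhile_gt (l1 l2 : List Int) (ans : Int) (h : l2.length < l1.length) :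
    fooWhile l1 l2 ans =
      (ans + 2 * (l2.sum + (l1.drop (l1.length - l2.length)).sum),
       l1.take (l1.length - l2.length), []) := by
  induction l2 using List.reverseRecOn generalizing l1 ans with
  | nil =>
    rw [fooWhile]; simp
  | append_singleton t y ih =>
    rcases List.eq_nil_or_concat l1 with rfl | ⟨t1, x, rfl⟩
    · simp at h
    · simp only [List.concat_eq_append] at h ⊢
      have hle : t.length < t1.length := by simp at h; omega
      have hd : (t1 ++ [x]).length - (t ++ [y]).length = t1.length - t.length := by
        simp
      rw [fooWhile_step, ih _ _ hle, hd]
      simp only [Prod.mk.injEq]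
      refine ⟨?_, ?_, trivial⟩
      · rw [List.drop_append_of_le_length (by omega)]
        simp; ring
      · rw [List.take_append_of_le_length (by omega)]

lemma sum_sorted (xs : List Int) : (PySem.List.sorted xs (fun x => x) false).sum = xs.sum :=
  (PySem.List.sorted_perm xs (fun x => x) false).sum_eq

-- A's tail (sort both, pop-pair, leftovers) equals B's tail (closed form, one sort)
lemma tail_eq (Z O : List Int) (m : Int) :
    (if (fooWhile (PySem.List.sorted Z (fun x => x) false) (PySem.List.sorted O (fun x => x) false) 0).2.1 ≠ [] then
       (fooWhile (PySem.List.sorted Z (fun x => x) false) (PySem.List.sorted O (fun x => x) false) 0).1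
         + (fooWhile (PySem.List.sorted Z (fun x => x) false) (PySem.List.sorted O (fun x => x) false) 0).2.1.sum
     else if (fooWhile (PySem.List.sorted Z (fun x => x) false) (PySem.List.sorted O (fun x => x) false) 0).2.2 ≠ [] then
       (fooWhile (PySem.List.sorted Z (fun x => x) false) (PySem.List.sorted O (fun x => x) false) 0).1
         + (fooWhile (PySem.List.sorted Z (fun x => x) false) (PySem.List.sorted O (fun x => x) false) 0).2.2.sum
     else (fooWhile (PySem.List.sorted Z (fun x => x) false) (PySem.List.sorted O (fun x => x) false) 0).1 - m)
    = (if Z.length = O.length then 2 * (Z.sum + O.sum) - m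
       else
         let sl := if Z.length < O.length then (Z, O) else (O, Z)
         let k := sl.1.length
         if k = 0 then sl.2.sum
         else
           let srt := PySem.List.sorted sl.2 (fun x => x) false
           2 * sl.1.sum + sl.2.sum +
             (PySem.List.slice srt (some ((srt.length : Int) - (k : Int))) none).sum) := by
  set l1 := PySem.List.sorted Z (fun x => x) false with hl1
  set l2 := PySem.List.sorted O (fun x => x) false with hl2
  have hL1 : l1.length = Z.length := PySem.List.length_sorted ..
  have hL2 : l2.length = O.length := PySem.List.length_sorted ..
  have hs1 : l1.sum = Z.sum := sum_sorted Z
  have hs2 : l2.sum = O.sum := sum_sorted O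
  rcases lt_trichotomy Z.length O.length with hlt | heq | hgt
  · -- zeros strictly fewer: A pairs all of l1 with the top slice of l2
    rw [fooWhile_le l1 l2 0 (by omega)]
    have hne : l2.take (l2.length - l1.length) ≠ [] := by
      have h2 : l2 ≠ [] := by
        intro he; rw [he] at hL2; simp at hL2; omega
      simp only [ne_eq, List.take_eq_nil_iff, not_or]
      exact ⟨by omega, h2⟩
    have hneq : ¬ Z.length = O.length := by omega
    simp only [ne_eq, not_true_eq_false, if_false, hne, not_false_eq_true, hneq,
      hlt, if_pos]
    by_cases hk : Z.length = 0
    · have hZ0 : Z = [] := List.length_eq_zero_iff.mp hk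
      have hdrop : l2.drop (l2.length - l1.length) = [] := by
        have : l2.length - l1.length = l2.length := by omega
        rw [this, List.drop_length]
      have htake : l2.take (l2.length - l1.length) = l2 := by
        have : l2.length - l1.length = l2.length := by omega
        rw [this, List.take_length]
      rw [if_pos hk, hdrop, htake]
      have h10 : l1.sum = 0 := by rw [hs1, hZ0]; rfl
      simp [h10, hs2]
    rw [if_neg hk]
    rw [PySem.List.slice_from _ (by rw [← hl2, hL2]; omega)]
    have htn : (((l2.length : Int)) - ((Z.length : Int))).toNat = l2.length - l1.length := by
      omega
    rw [← hl2, htn]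
    have hsplit := congrArg List.sum (List.take_append_drop (l2.length - l1.length) l2)
    rw [List.sum_append] at hsplit
    rw [hs2] at hsplit
    rw [hs1] at *
    omega
  · -- equal sizes: everything is paired and min(b) is subtracted
    rw [fooWhile_le l1 l2 0 (by omega)]
    have h0 : l2.length - l1.length = 0 := by omega
    rw [h0]
    simp only [List.drop_zero, List.take_zero, ne_eq, not_true_eq_false, if_false, heq,
      if_pos]
    rw [hs1, hs2]
    ring
  · -- zeros strictly more: symmetric, the short group is the ones
    rw [fooWhile_gt l1 l2 0 (by omega)]
    have hne : l1.take (l1.length - l2.length) ≠ [] := by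
      have h1 : l1 ≠ [] := by
        intro he; rw [he] at hL1; simp at hL1; omega
      simp only [ne_eq, List.take_eq_nil_iff, not_or]
      exact ⟨by omega, h1⟩
    have hneq : ¬ Z.length = O.length := by omega
    have hnlt : ¬ Z.length < O.length := by omega
    simp only [ne_eq, hne, not_false_eq_true, if_true, hneq, hnlt, if_false]
    by_cases hk : O.length = 0
    · have hO0 : O = [] := List.length_eq_zero_iff.mp hk
      have hdrop : l1.drop (l1.length - l2.length) = [] := by
        have : l1.length - l2.length = l1.length := by omega
        rw [this, List.drop_length]
      have htake : l1.take (l1.length - l2.length) = l1 := by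
        have : l1.length - l2.length = l1.length := by omega
        rw [this, List.take_length]
      rw [if_pos hk, hdrop, htake]
      have h20 : l2.sum = 0 := by rw [hs2, hO0]; rfl
      simp [h20, hs1]
    rw [if_neg hk]
    rw [PySem.List.slice_from _ (by rw [← hl1, hL1]; omega)]
    have htn : (((l1.length : Int)) - ((O.length : Int))).toNat = l1.length - l2.length := by
      omega
    rw [← hl1, htn]
    have hsplit := congrArg List.sum (List.take_append_drop (l1.length - l2.length) l1)
    rw [List.sum_append] at hsplit
    rw [hs1] at hsplit
    rw [hs2] at *
    omega

-- ===== VERDICT (by name: the statement is the Claim_ definition above) =====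
theorem foo_spec : Claim_equal_foo := by
  intro n a b _ hpre
  obtain ⟨hna, hnb, hb⟩ := hpre
  unfold Spec_foo foo foo_alt
  rw [partition_eq]
  simp only [List.nil_append]
  have hm0 : (0 : Int) ≤ max n 0 := le_max_right _ _
  rw [PySem.List.slice_to a hm0, PySem.List.slice_to b hm0]
  have hmt : (max n 0).toNat = n.toNat := by omega
  rw [hmt]
  have hrM : PySem.List.pyRange 0 n 1 = PySem.List.pyRange 0 ((n.toNat : Nat) : Int) 1 := by
    rcases le_or_gt 0 n with hn | hn
    · rw [Int.toNat_of_nonneg hn]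
    · rw [PySem.List.pyRange_one_eq_nil (by omega), PySem.List.pyRange_one_eq_nil (by omega)]
  rw [hrM]
  have hMa : n.toNat ≤ a.length := by omega
  have hMb : n.toNat ≤ b.length := by omega
  obtain ⟨hbr1, hbr2⟩ := bridge a b n.toNat hMa hMb
  rw [hbr1, hbr2]
  set aa := a.take n.toNat with haa
  set bb := b.take n.toNat with hbb
  set Z := ((aa.zip bb).filter (fun e => e.1 == 0)).map (fun e => e.2) with hZ
  set O := ((aa.zip bb).filter (fun e => !(e.1 == 0))).map (fun e => e.2) with hO
  have hlab : aa.length = bb.length := by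
    simp [haa, hbb]; omega
  have hzo : (if PySem.List.count aa 0 = 0 then (([] : List Int), bb)
      else if (PySem.List.count aa 0 : Int) = max n 0 then (bb, ([] : List Int))
      else (aa.zip bb).foldl
        (fun (st : List Int × List Int) e =>
          if e.1 = 0 then (st.1 ++ [e.2], st.2) else (st.1, st.2 ++ [e.2])) ([], []))
      = (Z, O) := by
    by_cases hc0 : PySem.List.count aa 0 = 0
    · -- no zeros at all: Z = [], O = bb
      have hnotin : (0 : Int) ∉ aa := by
        rw [PySem.List.count_eq] at hc0
        exact List.count_eq_zero.mp (by exact_mod_cast hc0)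
      rw [if_pos hc0, hZ, hO]
      have hfz : (aa.zip bb).filter (fun e => e.1 == 0) = [] := by
        rw [List.filter_eq_nil_iff]
        intro e he
        obtain ⟨x, y⟩ := e
        have := (List.of_mem_zip he).1
        simp only [beq_iff_eq]
        intro hx0; exact hnotin (hx0 ▸ this)
      have hfo : (aa.zip bb).filter (fun e => !(e.1 == 0)) = aa.zip bb := by
        rw [List.filter_eq_self]
        intro e he
        obtain ⟨x, y⟩ := e
        have := (List.of_mem_zip he).1
        simp only [Bool.not_eq_eq_eq_not, Bool.not_true, beq_eq_false_iff_ne, ne_eq]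
        intro hx0; exact hnotin (hx0 ▸ this)
      rw [hfz, hfo]
      simp [List.map_snd_zip (le_of_eq hlab.symm)]
    · rw [if_neg hc0]
      by_cases hcm : (PySem.List.count aa 0 : Int) = max n 0
      · -- everything is zero: Z = bb, O = []
        have hcnt : aa.count 0 = aa.length := by
          rw [PySem.List.count_eq] at hcm
          have hlen : aa.length = (max n 0).toNat := by
            simp [haa]; omega
          omega
        have hall : ∀ x ∈ aa, (0 : Int) = x := List.count_eq_length.mp hcnt
        rw [if_pos hcm, hZ, hO]
        have hfz : (aa.zip bb).filter (fun e => e.1 == 0) = aa.zip bb := by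
          rw [List.filter_eq_self]
          intro e he
          obtain ⟨x, y⟩ := e
          have := (List.of_mem_zip he).1
          simp only [beq_iff_eq]
          exact (hall x this).symm
        have hfo : (aa.zip bb).filter (fun e => !(e.1 == 0)) = [] := by
          rw [List.filter_eq_nil_iff]
          intro e he
          obtain ⟨x, y⟩ := e
          have := (List.of_mem_zip he).1
          simp only [Bool.not_eq_eq_eq_not, Bool.not_true, beq_eq_false_iff_ne, ne_eq,
            not_not]
          exact (hall x this).symm
        rw [hfz, hfo]
        simp [List.map_snd_zip (le_of_eq hlab.symm)]
      · rw [if_neg hcm, zip_partition_eq]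
        simp [hZ, hO]
  rw [hzo]
  exact tail_eq Z O _
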